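-- pv_equiv track=rewrite | github.com/jied314/IQs | tags/two_pointers/valid_triangles.py | valid_triangles
-- ===== SOURCE A (Python) =====
-- def valid_triangles(nums):
--     ret = []
--     nums.sort()
--     for i in range(0, len(nums)-2):
--         k = i + 2
--         for j in range(i+1, len(nums)):
--             max_allowed = nums[i] + nums[j]
--             while k < len(nums) and nums[k] < max_allowed:
--                 k += 1
--             for c in range(1, k-j):
--                 ret.append([nums[i], nums[j], nums[c+j]])
--     return ret
-- ===== SOURCE B (Python) =====
-- def valid_triangles(nums):
--     # Same in-place sort side effect as the original; equivalence is about the return value.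
--     nums.sort()
--     n = len(nums)
--     return [[nums[i], nums[j], nums[m]]
--             for i in range(n)
--             for j in range(i + 1, n)
--             for m in range(j + 1, n)
--             if nums[i] + nums[j] > nums[m]]
-- ===== Notes on version B (the rewrite author's own statement) =====
-- stated objective: simpler
-- what changed: Replaces the carried monotone two-pointer k (advanced by a while loop across j) with a plain triple comprehension over i<j<m testing nums[i]+nums[j]>nums[m]; on the sorted array the accepted m form the same contiguous runs, so the output is identical.
import Mathlib
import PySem

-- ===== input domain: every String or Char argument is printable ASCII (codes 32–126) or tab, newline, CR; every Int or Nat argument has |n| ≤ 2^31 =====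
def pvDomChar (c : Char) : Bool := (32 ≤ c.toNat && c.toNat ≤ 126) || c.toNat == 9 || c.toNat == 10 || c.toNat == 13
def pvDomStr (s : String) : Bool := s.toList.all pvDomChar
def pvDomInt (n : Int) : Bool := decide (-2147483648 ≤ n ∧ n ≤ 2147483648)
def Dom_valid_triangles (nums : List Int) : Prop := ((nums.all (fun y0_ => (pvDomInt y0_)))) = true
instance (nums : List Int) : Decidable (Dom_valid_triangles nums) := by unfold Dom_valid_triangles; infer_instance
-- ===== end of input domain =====

-- B replaces A's carried two-pointer with a plain triple loop over sorted indices i<j<m (simpler,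
-- identical output). Both Pythons sort nums in place; the equivalence proved is about the return value.

-- ===== PORT A =====
-- the 'while k < len(nums) and nums[k] < max_allowed: k += 1' loop
def whileK (s : List Int) (mx : Int) (k : Nat) : Nat :=
  if h : k < s.length ∧ s.getD k 0 < mx then whileK s mx (k + 1) else k
termination_by s.length - k
decreasing_by omega

-- all indices reached by A's loops are in range, so nums[·] is exactly getD · 0
def valid_triangles (nums : List Int) : List (List Int) :=
  let s := PySem.List.sorted nums (fun x => x) false
  let n := s.length
  (List.range (n - 2)).foldl
    (fun ret i =>
      ((List.range' (i + 1) (n - (i + 1))).foldl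
        (fun (st : Nat × List (List Int)) j =>
          let mx := s.getD i 0 + s.getD j 0
          let k := whileK s mx st.1
          (k, st.2 ++ (List.range' 1 (k - j - 1)).map
                (fun c => [s.getD i 0, s.getD j 0, s.getD (c + j) 0])))
        (i + 2, ret)).2)
    []

-- ===== PORT B =====
def valid_triangles_alt (nums : List Int) : List (List Int) :=
  let s := PySem.List.sorted nums (fun x => x) false
  let n := s.length
  (List.range n).flatMap fun i =>
    (List.range' (i + 1) (n - (i + 1))).flatMap fun j =>
      (List.range' (j + 1) (n - (j + 1))).filterMap fun m =>
        if s.getD i 0 + s.getD j 0 > s.getD m 0 then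
          some [s.getD i 0, s.getD j 0, s.getD m 0]
        else none

-- ===== PRECONDITION & SPEC =====
def Spec_valid_triangles (nums : List Int) (out : List (List Int)) : Prop := out = valid_triangles_alt nums
instance (nums : List Int) (out : List (List Int)) : Decidable (Spec_valid_triangles nums out) := by unfold Spec_valid_triangles; infer_instance

-- ===== CLAIM (what is proved, stated in full; the proofs are below) =====
def Claim_equal_valid_triangles : Prop := ∀ (nums : List Int), Dom_valid_triangles nums → Spec_valid_triangles nums (valid_triangles nums)

-- ===== LEMMAS AND PROOFS =====

-- B's inner body, as a function of the sorted list and i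
def pvBlock (s : List Int) (i : Nat) : List (List Int) :=
  (List.range' (i + 1) (s.length - (i + 1))).flatMap fun j =>
    (List.range' (j + 1) (s.length - (j + 1))).filterMap fun m =>
      if s.getD i 0 + s.getD j 0 > s.getD m 0 then
        some [s.getD i 0, s.getD j 0, s.getD m 0]
      else none

theorem getD_mono_of_pairwise (s : List Int) (h : s.Pairwise (· ≤ ·)) {p q : Nat}
    (hpq : p ≤ q) (hq : q < s.length) : s.getD p 0 ≤ s.getD q 0 := by
  rcases Nat.eq_or_lt_of_le hpq with rfl | hlt
  · exact le_refl _
  · have hp : p < s.length := Nat.lt_of_lt_of_le hlt (Nat.le_of_lt hq)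
    rw [List.getD_eq_getElem s 0 hp, List.getD_eq_getElem s 0 hq]
    exact (List.pairwise_iff_getElem.mp h) p q hp hq hlt

theorem whileK_le (s : List Int) (mx : Int) (k : Nat) (hk : k ≤ s.length) :
    whileK s mx k ≤ s.length := by
  fun_induction whileK s mx k with
  | case1 k h ih => exact ih (by omega)
  | case2 k h => exact hk

theorem whileK_ge (s : List Int) (mx : Int) (k : Nat) : k ≤ whileK s mx k := by
  fun_induction whileK s mx k with
  | case1 k h ih => omega
  | case2 k h => exact le_refl _

theorem whileK_lt_of_mem (s : List Int) (mx : Int) (k : Nat) :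
    ∀ m, k ≤ m → m < whileK s mx k → s.getD m 0 < mx := by
  fun_induction whileK s mx k with
  | case1 k h ih =>
    intro m hm1 hm2
    rcases Nat.eq_or_lt_of_le hm1 with rfl | hlt
    · exact h.2
    · exact ih m hlt hm2
  | case2 k h => intro m hm1 hm2; omega

theorem whileK_stop (s : List Int) (mx : Int) (k : Nat) :
    whileK s mx k < s.length → mx ≤ s.getD (whileK s mx k) 0 := by
  fun_induction whileK s mx k with
  | case1 k h ih => exact ih
  | case2 k h => intro hlt; exact le_of_not_gt fun hgt => h ⟨hlt, hgt⟩

-- shift the index of a map over a range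
theorem map_range'_add {α : Type} (f : Nat → α) (j : Nat) :
    ∀ (L b : Nat), (List.range' b L).map (fun c => f (c + j)) = (List.range' (b + j) L).map f := by
  intro L
  induction L with
  | zero => intro b; simp
  | succ L ih =>
    intro b
    rw [List.range'_succ, List.range'_succ, List.map_cons, List.map_cons, ih (b + 1)]
    have : b + 1 + j = b + j + 1 := by omega
    rw [this]

-- a filterMap over an ascending range whose test is equivalent to m < K is a map over the prefix
theorem filterMap_if_range' {α : Type} (f : Nat → α) (p : Nat → Bool) (K : Nat) :
    ∀ (L a : Nat), K ≤ a + L → (∀ m, a ≤ m → m < a + L → (p m = true ↔ m < K)) →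
      (List.range' a L).filterMap (fun m => if p m then some (f m) else none)
        = (List.range' a (K - a)).map f := by
  intro L
  induction L with
  | zero =>
    intro a hK _
    have : K - a = 0 := by omega
    simp [this]
  | succ L ih =>
    intro a hK h
    rw [List.range'_succ, List.filterMap_cons]
    by_cases hpa : p a = true
    · have haK : a < K := (h a (le_refl a) (by omega)).mp hpa
      have hKa : K - a = (K - (a + 1)) + 1 := by omega
      rw [hpa]
      simp only [if_true]
      rw [hKa, List.range'_succ, List.map_cons,
        ih (a + 1) (by omega) (fun m hm1 hm2 => h m (by omega) (by omega))]
    · have haK : ¬ a < K := fun hc => hpa ((h a (le_refl a) (by omega)).mpr hc)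
      have hK0 : K - a = 0 := by omega
      have hK1 : K - (a + 1) = 0 := by omega
      have hrest := ih (a + 1) (by omega) (fun m hm1 hm2 => h m (by omega) (by omega))
      rw [hK1] at hrest
      simp only [List.range'_zero, List.map_nil] at hrest
      simp [hpa, hK0, hrest]

-- the j-loop of A, on a sorted array, emits exactly B's filtered triples, appended to the accumulator
theorem jloop_eq (s : List Int) (hs : s.Pairwise (· ≤ ·)) (i : Nat) :
    ∀ (L j0 : Nat) (k : Nat) (acc : List (List Int)),
      j0 + L = s.length → i < j0 → k ≤ s.length →
      (∀ m, j0 < m → m < k → s.getD m 0 < s.getD i 0 + s.getD j0 0) →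
      ((List.range' j0 L).foldl
        (fun (st : Nat × List (List Int)) j =>
          let mx := s.getD i 0 + s.getD j 0
          let k := whileK s mx st.1
          (k, st.2 ++ (List.range' 1 (k - j - 1)).map
                (fun c => [s.getD i 0, s.getD j 0, s.getD (c + j) 0])))
        (k, acc)).2
      = acc ++ (List.range' j0 L).flatMap (fun j =>
          (List.range' (j + 1) (s.length - (j + 1))).filterMap fun m =>
            if s.getD i 0 + s.getD j 0 > s.getD m 0 then
              some [s.getD i 0, s.getD j 0, s.getD m 0]
            else none) := by
  intro L
  induction L with
  | zero => intro j0 k acc _ _ _ _; simp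
  | succ L ih =>
    intro j0 k acc hlen hij hk hinv
    rw [List.range'_succ, List.foldl_cons, List.flatMap_cons]
    set mx := s.getD i 0 + s.getD j0 0 with hmx
    set k1 := whileK s mx k with hk1
    have hk1n : k1 ≤ s.length := whileK_le s mx k hk
    have hkk1 : k ≤ k1 := whileK_ge s mx k
    -- pointwise characterisation of the accepted m for this j0
    have hchar : ∀ m, j0 + 1 ≤ m → m < s.length → (s.getD m 0 < mx ↔ m < k1) := by
      intro m hm1 hm2
      constructor
      · intro hlt
        by_contra hge'
        have hge : k1 ≤ m := Nat.le_of_not_lt hge'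
        have hk1lt : k1 < s.length := by omega
        have hstop := whileK_stop s mx k hk1lt
        rw [← hk1] at hstop
        have hmono := getD_mono_of_pairwise s hs hge hm2
        omega
      · intro hlt
        by_cases hcase : k ≤ m
        · exact whileK_lt_of_mem s mx k m hcase (hk1 ▸ hlt)
        · exact hinv m (by omega) (Nat.lt_of_not_le hcase)
    -- the emitted list for this j0 equals B's filterMap
    have hemit :
        (List.range' (j0 + 1) (s.length - (j0 + 1))).filterMap
            (fun m => if s.getD i 0 + s.getD j0 0 > s.getD m 0 then
              some [s.getD i 0, s.getD j0 0, s.getD m 0] else none)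
          = (List.range' 1 (k1 - j0 - 1)).map
              (fun c => [s.getD i 0, s.getD j0 0, s.getD (c + j0) 0]) := by
      rw [map_range'_add (fun m => [s.getD i 0, s.getD j0 0, s.getD m 0]) j0 (k1 - j0 - 1) 1]
      have h1 : (1 : Nat) + j0 = j0 + 1 := by omega
      rw [h1]
      have h2 : k1 - j0 - 1 = k1 - (j0 + 1) := by omega
      rw [h2]
      have := filterMap_if_range' (fun m => [s.getD i 0, s.getD j0 0, s.getD m 0])
        (fun m => decide (s.getD i 0 + s.getD j0 0 > s.getD m 0)) k1
        (s.length - (j0 + 1)) (j0 + 1) (by omega)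
        (by
          intro m hm1 hm2
          simp only [decide_eq_true_eq]
          exact hchar m hm1 (by omega))
      simp only [decide_eq_true_eq] at this
      exact this
    -- re-establish the invariant at j0 + 1 and apply the IH
    have hinv' : ∀ m, j0 + 1 < m → m < k1 → s.getD m 0 < s.getD i 0 + s.getD (j0 + 1) 0 := by
      intro m hm1 hm2
      have hmn : m < s.length := by omega
      have hj1n : j0 + 1 < s.length := by omega
      have hlt : s.getD m 0 < mx := (hchar m (by omega) hmn).mpr hm2
      have hmono : s.getD j0 0 ≤ s.getD (j0 + 1) 0 :=
        getD_mono_of_pairwise s hs (by omega) hj1n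
      omega
    rw [ih (j0 + 1) k1
      (acc ++ (List.range' 1 (k1 - j0 - 1)).map
        (fun c => [s.getD i 0, s.getD j0 0, s.getD (c + j0) 0]))
      (by omega) (by omega) hk1n hinv', hemit]
    simp [List.append_assoc]

-- an i with i + 2 ≥ n contributes nothing
theorem pvBlock_nil (s : List Int) (i : Nat) (h : s.length ≤ i + 2) : pvBlock s i = [] := by
  unfold pvBlock
  rw [List.flatMap_eq_nil_iff]
  intro j hj
  simp only [List.mem_range'_1] at hj
  have : s.length - (j + 1) = 0 := by omega
  rw [this]
  simp

-- ===== VERDICT (by name: the statement is the Claim_ definition above) =====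
theorem valid_triangles_spec : Claim_equal_valid_triangles := by
  intro nums _
  unfold Spec_valid_triangles valid_triangles valid_triangles_alt
  set s := PySem.List.sorted nums (fun x => x) false with hsdef
  have hs : s.Pairwise (· ≤ ·) := by
    have := PySem.List.sorted_pairwise (xs := nums) (key := fun x => x)
    simpa [hsdef] using this
  set n := s.length with hn
  -- A's outer loop: each iteration appends pvBlock s i
  have hstep : (List.range (n - 2)).foldl
      (fun ret i =>
        ((List.range' (i + 1) (n - (i + 1))).foldl
          (fun (st : Nat × List (List Int)) j =>
            let mx := s.getD i 0 + s.getD j 0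
            let k := whileK s mx st.1
            (k, st.2 ++ (List.range' 1 (k - j - 1)).map
                  (fun c => [s.getD i 0, s.getD j 0, s.getD (c + j) 0])))
          (i + 2, ret)).2) []
      = (List.range (n - 2)).foldl (fun ret i => ret ++ pvBlock s i) [] := by
    apply PySem.List.foldl_congr_mem
    intro acc i hi
    have hin : i < n - 2 := List.mem_range.mp hi
    have := jloop_eq s hs i (n - (i + 1)) (i + 1) (i + 2) acc
      (by omega) (by omega) (by omega) (by intro m hm1 hm2; omega)
    simpa [pvBlock] using this
  rw [hstep, PySem.List.foldl_append_eq_flatMap]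
  simp only [List.nil_append]
  -- extend the i-range from n - 2 to n: the extra blocks are empty
  show (List.range (n - 2)).flatMap (fun i => pvBlock s i)
      = (List.range n).flatMap (fun i => pvBlock s i)
  rcases Nat.lt_or_ge n 2 with hsmall | hbig
  · have h2 : n - 2 = 0 := by omega
    rw [h2]
    simp only [List.range_zero, List.flatMap_nil]
    symm
    rw [List.flatMap_eq_nil_iff]
    intro i hi
    exact pvBlock_nil s i (by have := List.mem_range.mp hi; omega)
  · obtain ⟨m, hm⟩ : ∃ m, n = m + 2 := ⟨n - 2, by omega⟩
    rw [hm]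
    have h2 : m + 2 - 2 = m := by omega
    rw [h2, List.range_succ, List.range_succ]
    simp only [List.flatMap_append, List.flatMap_singleton]
    rw [pvBlock_nil s m (by omega), pvBlock_nil s (m + 1) (by omega)]
    simp
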